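-- pv_equiv track=rewrite | github.com/mini102/Programmers_Greedy | A3.py | solution
-- ===== SOURCE A (Python) =====
-- import itertools
--
-- def solution(number, k):
--     answer = ''
--     mlist = []
--     tmplist = [i for i in range(0,len(number))]
--
--     result = list(itertools.combinations((tmplist),k))
--     numlist = list(number)
--
--     for i in result:
--         for j in reversed(range(0,k)):
--             numlist.pop(i[j])
--         st = "".join(numlist)
--         mlist.append(st)
--         numlist = list(number)
--     return str(max(mlist))
-- ===== SOURCE B (Python) =====
-- def solution(number, k):
--     # Greedy: build the answer left to right; each next character is the first
--     # occurrence of the maximum within the window that still leaves enough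
--     # characters for the remaining positions.
--     keep = len(number) - k
--     res = []
--     rest = number
--     for r in range(keep, 0, -1):
--         window = rest[:len(rest) - r + 1]
--         best_i = 0
--         best_c = window[0]
--         i = 0
--         for c in window:
--             if best_c < c:
--                 best_i = i
--                 best_c = c
--             i += 1
--         res.append(best_c)
--         rest = rest[best_i + 1:]
--     return "".join(res)
-- ===== Notes on version B (the rewrite author's own statement) =====
-- stated objective: faster
-- what changed: A enumerates all C(n,k) index combinations, builds each remaining string and takes the maximum; B builds the answer greedily left to right, each step taking the first occurrence of the maximal character in the window that leaves enough characters for the remaining positions.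
import Mathlib
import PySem

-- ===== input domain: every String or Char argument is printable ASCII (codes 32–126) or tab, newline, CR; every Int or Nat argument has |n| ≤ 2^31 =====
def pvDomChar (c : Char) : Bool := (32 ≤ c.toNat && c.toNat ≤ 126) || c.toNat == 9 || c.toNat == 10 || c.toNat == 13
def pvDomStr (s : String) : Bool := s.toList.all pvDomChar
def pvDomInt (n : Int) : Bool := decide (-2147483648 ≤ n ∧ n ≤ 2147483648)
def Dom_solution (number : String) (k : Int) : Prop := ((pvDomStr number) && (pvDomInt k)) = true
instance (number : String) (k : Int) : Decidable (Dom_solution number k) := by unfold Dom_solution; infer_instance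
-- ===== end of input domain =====

-- B replaces A's exhaustive enumeration of all C(n,k) deletion patterns by a
-- left-to-right greedy choice (first maximal character in the feasible window).

-- ===== PORT A =====
-- 'numlist.pop(i[j])' for j = k-1..0 : pop the combination's indices, largest first
def popStep (l : List Char) (idx : Int) : List Char :=
  match PySem.List.pop? l idx with
  | some (_, rest) => rest
  | none => l          -- Python would raise IndexError; unreachable for combinations of range(len)

def solution (number : String) (k : Int) : String :=
  let s := number.toList                                   -- numlist = list(number)
  let tmplist := PySem.List.pyRange 0 (PySem.Str.len number) 1
  let result := PySem.List.combinations tmplist k.toNat    -- k < 0 raises in Python: outside Pre_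
  let mlist := result.foldl (fun acc combo =>
      let numlist := combo.foldr (fun idx l => popStep l idx) s
      acc ++ [String.ofList numlist]) []
  (PySem.List.max? mlist (fun x => x)).getD ""             -- max([]) raises: outside Pre_

-- ===== PORT B =====
-- inner 'for c in window' loop: first index/value of the maximal character
def pickLoop : List Char → Nat → Char → Nat → Nat × Char
  | [], bi, bc, _ => (bi, bc)
  | c :: t, bi, bc, i => if bc < c then pickLoop t i c (i + 1) else pickLoop t bi bc (i + 1)

-- 'for r in range(keep, 0, -1)' loop; window = rest[:len(rest)-r+1] (slice clamps at 0)
def bLoop : Nat → List Char → List Char → List Char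
  | 0, _, res => res
  | r + 1, rest, res =>
    let window := rest.take (rest.length - r)
    match window with
    | [] => res                   -- window[0] would raise IndexError in Python; unreachable when k ≤ len
    | c0 :: _ =>
      let p := pickLoop window 0 c0 0
      bLoop r (rest.drop (p.1 + 1)) (res ++ [p.2])

def solution_alt (number : String) (k : Int) : String :=
  let keep := (PySem.Str.len number - k).toNat    -- range(keep,0,-1) has max(keep,0) iterations
  String.ofList (bLoop keep number.toList [])

-- ===== PRECONDITION & SPEC =====
-- Pre_ excludes k < 0 (itertools.combinations raises ValueError) and
-- k > len(number) (mlist is empty and max([]) raises ValueError).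
def Pre_solution (number : String) (k : Int) : Prop :=
  0 ≤ k ∧ k ≤ PySem.Str.len number
instance (number : String) (k : Int) : Decidable (Pre_solution number k) := by
  unfold Pre_solution; infer_instance

def pvWitness_solution : String × Int := ("1924", 2)

def Spec_solution (number : String) (k : Int) (out : String) : Prop := out = solution_alt number k
instance (number : String) (k : Int) (out : String) : Decidable (Spec_solution number k out) := by
  unfold Spec_solution; infer_instance

-- ===== CLAIM (what is proved, stated in full; the proofs are below) =====
def Claim_equal_solution : Prop := ∀ (number : String) (k : Int),
  Dom_solution number k → Pre_solution number k → Spec_solution number k (solution number k)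

-- ===== LEMMAS AND PROOFS =====

-- proof-side form of B's outer loop, without the accumulator
def gMax : List Char → Nat → List Char
  | _, 0 => []
  | s, m + 1 =>
    let window := s.take (s.length - m)
    match window with
    | [] => []
    | c0 :: _ =>
      let p := pickLoop window 0 c0 0
      p.2 :: gMax (s.drop (p.1 + 1)) m

lemma bLoop_eq_gMax : ∀ (m : Nat) (rest res : List Char),
    bLoop m rest res = res ++ gMax rest m := by
  intro m
  induction m with
  | zero => intro rest res; simp [bLoop, gMax]
  | succ r ih =>
    intro rest res
    simp only [bLoop, gMax]
    cases h : rest.take (rest.length - r) with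
    | nil => simp
    | cons c0 t => simp [ih]

-- pickLoop invariant: the result is the running best, or the first strictly better element
lemma pickLoop_inv : ∀ (w : List Char) (bi i : Nat) (bc : Char),
    (pickLoop w bi bc i = (bi, bc) ∧ ∀ x ∈ w, x ≤ bc) ∨
    (∃ p, ∃ hp : p < w.length, pickLoop w bi bc i = (i + p, w[p]) ∧ bc < w[p] ∧
      (∀ x ∈ w, x ≤ w[p]) ∧ (∀ q (hq : q < p), w[q]'(by omega) < w[p])) := by
  intro w
  induction w with
  | nil => intro bi i bc; left; simp [pickLoop]
  | cons c t ih =>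
    intro bi i bc
    by_cases hbc : bc < c
    · right
      rcases ih i (i + 1) c with ⟨heq, hle⟩ | ⟨p, hp, heq, hlt, hle, hfirst⟩
      · refine ⟨0, by simp, ?_, ?_, ?_, ?_⟩
        · simpa [pickLoop, hbc] using heq
        · simpa using hbc
        · intro x hx; rcases List.mem_cons.mp hx with rfl | hx
          · simp
          · simpa using hle x hx
        · omega
      · refine ⟨p + 1, by simpa using Nat.succ_lt_succ hp, ?_, ?_, ?_, ?_⟩
        · simp only [pickLoop, if_pos hbc, List.getElem_cons_succ]
          rw [heq, Prod.mk.injEq]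
          exact ⟨by omega, rfl⟩
        · simp only [List.getElem_cons_succ]
          exact lt_trans hbc hlt
        · intro x hx
          simp only [List.getElem_cons_succ]
          rcases List.mem_cons.mp hx with rfl | hx
          · exact le_of_lt hlt
          · exact hle x hx
        · intro q hq
          cases q with
          | zero => simpa using hlt
          | succ q' => simpa using hfirst q' (by omega)
    · rcases ih bi (i + 1) bc with ⟨heq, hle⟩ | ⟨p, hp, heq, hlt, hle, hfirst⟩
      · left
        refine ⟨by simpa [pickLoop, hbc] using heq, ?_⟩
        intro x hx; rcases List.mem_cons.mp hx with rfl | hx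
        · exact le_of_not_gt hbc
        · exact hle x hx
      · right
        refine ⟨p + 1, by simpa using Nat.succ_lt_succ hp, ?_, ?_, ?_, ?_⟩
        · simp only [pickLoop, if_neg hbc, List.getElem_cons_succ]
          rw [heq, Prod.mk.injEq]
          exact ⟨by omega, rfl⟩
        · simpa using hlt
        · intro x hx
          simp only [List.getElem_cons_succ]
          rcases List.mem_cons.mp hx with rfl | hx
          · exact le_trans (le_of_not_gt hbc) (le_of_lt hlt)
          · exact hle x hx
        · intro q hq
          cases q with
          | zero => simpa using lt_of_le_of_lt (le_of_not_gt hbc) hlt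
          | succ q' => simpa using hfirst q' (by omega)

lemma pick_spec (w : List Char) (c0 : Char) (t : List Char) (hw : w = c0 :: t) :
    ∃ p, ∃ hp : p < w.length, pickLoop w 0 c0 0 = (p, w[p]) ∧
      (∀ x ∈ w, x ≤ w[p]) ∧ (∀ q (hq : q < p), w[q]'(by omega) < w[p]) := by
  have hc0 : w[0]'(by simp [hw]) = c0 := by simp [hw]
  rcases pickLoop_inv w 0 0 c0 with ⟨heq, hle⟩ | ⟨p, hp, heq, _, hle, hfirst⟩
  · exact ⟨0, by simp [hw], by rw [hc0]; exact heq, by intro x hx; rw [hc0]; exact hle x hx, by omega⟩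
  · exact ⟨p, hp, by simpa using heq, hle, hfirst⟩

-- gMax is a subsequence of the required length
lemma gMax_sublist : ∀ (m : Nat) (s : List Char), m ≤ s.length →
    (gMax s m).Sublist s ∧ (gMax s m).length = m := by
  intro m
  induction m with
  | zero => intro s _; simp [gMax]
  | succ m ih =>
    intro s hm
    have hwlen : (s.take (s.length - m)).length = s.length - m := by
      simp only [List.length_take]; omega
    cases hwin : s.take (s.length - m) with
    | nil => exfalso; rw [hwin] at hwlen; simp at hwlen; omega
    | cons c0 t =>
      rcases pick_spec _ c0 t hwin with ⟨p, hp, heq, hle, hfirst⟩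
      have hplen : p < s.length - m := by rw [hwlen] at hp; exact hp
      have hps : p < s.length := by omega
      have hwp : (s.take (s.length - m))[p]'(by rw [hwin] at hwlen ⊢; omega) = s[p] :=
        List.getElem_take
      have hm' : m ≤ (s.drop (p + 1)).length := by simp only [List.length_drop]; omega
      rcases ih (s.drop (p + 1)) hm' with ⟨hsub, hlen⟩
      constructor
      · show (gMax s (m + 1)).Sublist s
        have hg : gMax s (m + 1) = s[p] :: gMax (s.drop (p + 1)) m := by
          simp only [gMax, hwin]
          rw [show (pickLoop (c0 :: t) 0 c0 0) = (p, s[p]) by rw [← hwin, heq, ← hwp]]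
        rw [hg]
        have h1 : List.Sublist [s[p]] (s.take (p + 1)) := by
          apply List.singleton_sublist.mpr
          have : (s.take (p + 1))[p]'(by simp only [List.length_take]; omega) = s[p] := List.getElem_take
          rw [← this]; exact List.getElem_mem _
        have h2 := List.Sublist.append h1 hsub
        simpa using h2
      · have hg : gMax s (m + 1) = s[p] :: gMax (s.drop (p + 1)) m := by
          simp only [gMax, hwin]
          rw [show (pickLoop (c0 :: t) 0 c0 0) = (p, s[p]) by rw [← hwin, heq, ← hwp]]
        rw [hg]; simp [hlen]

-- gMax dominates every subsequence of the same length (lexicographically)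
lemma gMax_max : ∀ (m : Nat) (s t : List Char), m ≤ s.length → t.Sublist s →
    t.length = m → t ≤ gMax s m := by
  intro m
  induction m with
  | zero =>
    intro s t _ _ hlen
    rw [List.length_eq_zero_iff.mp hlen]
    simp [gMax]
  | succ m ih =>
    intro s t hm hsub hlen
    cases t with
    | nil => simp at hlen
    | cons c t' =>
      have hwlen : (s.take (s.length - m)).length = s.length - m := by simp only [List.length_take]; omega
      cases hwin : s.take (s.length - m) with
      | nil => exfalso; rw [hwin] at hwlen; simp at hwlen; omega
      | cons c0 tw =>
        rcases pick_spec _ c0 tw hwin with ⟨pb, hpb, heq, hle, hfirst⟩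
        have hpbs : pb < s.length - m := by rw [hwlen] at hpb; exact hpb
        have hwb : (s.take (s.length - m))[pb]'(by rw [hwin] at hwlen ⊢; omega) = s[pb]'(by omega) :=
          List.getElem_take
        have hg : gMax s (m + 1) = (s[pb]'(by omega)) :: gMax (s.drop (pb + 1)) m := by
          simp only [gMax, hwin]
          rw [show (pickLoop (c0 :: tw) 0 c0 0) = (pb, s[pb]'(by omega)) by
            rw [← hwin, heq, ← hwb]]
        -- decompose the sublist: s = r₁ ++ r₂ with c ∈ r₁, t' <+ r₂
        rcases List.cons_sublist_iff.mp hsub with ⟨r₁, r₂, hs, hc, ht'⟩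
        rcases List.getElem_of_mem hc with ⟨p0, hp0r, hp0v⟩
        have hsr : s.length = r₁.length + r₂.length := by rw [hs]; simp
        have ht'len : t'.length = m := by simpa using hlen
        have hmr₂ : m ≤ r₂.length := by
          have := ht'.length_le; omega
        have hp0lt : p0 < s.length - m := by omega
        have hsp0 : s[p0]'(by omega) = c := by
          have h1 := List.getElem_of_eq hs (show p0 < s.length by omega)
          rw [h1, List.getElem_append_left hp0r]
          exact hp0v
        -- c is in the window, hence ≤ the picked character
        have hcle : c ≤ s[pb]'(by omega) := by
          have hmem : c ∈ s.take (s.length - m) := by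
            rw [← hsp0, ← List.getElem_take (i := p0) (j := s.length - m)
              (h := by rw [hwlen]; omega)]
            exact List.getElem_mem _
          have := hle c hmem
          rwa [hwb] at this
        rw [hg]
        rcases lt_or_eq_of_le hcle with hlt | heqc
        · -- strictly smaller first character
          exact le_of_lt (List.Lex.rel hlt)
        · -- equal first character: firstness forces pb ≤ p0; recurse
          have hpb_le : pb ≤ p0 := by
            by_contra hcon
            have hlt0 := hfirst p0 (by omega)
            rw [hwb, List.getElem_take, hsp0, heqc] at hlt0
            exact lt_irrefl _ hlt0
          -- t' is a sublist of drop (pb+1) s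
          have hr₂ : r₂ = s.drop r₁.length := by rw [hs]; simp
          have hdropsub : (s.drop r₁.length).Sublist (s.drop (pb + 1)) := by
            apply List.drop_sublist_drop_left
            omega
          have ht'sub : t'.Sublist (s.drop (pb + 1)) := by
            rw [hr₂] at ht'; exact ht'.trans hdropsub
          have hm' : m ≤ (s.drop (pb + 1)).length := by simp only [List.length_drop]; omega
          have hrec := ih (s.drop (pb + 1)) t' hm' ht'sub ht'len
          rw [heqc]
          exact List.cons_le_cons _ hrec

-- removing a list of positions, last position first (A's inner loop, in Nat form)
def remIdx (c : List Nat) (s : List Char) : List Char := c.foldr (fun i l => l.eraseIdx i) s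

lemma remIdx_shift : ∀ (c : List Nat) (a : Char) (s : List Char),
    remIdx (c.map (· + 1)) (a :: s) = a :: remIdx c s := by
  intro c
  induction c with
  | nil => intro a s; rfl
  | cons x c ih =>
    intro a s
    simp only [remIdx, List.map_cons, List.foldr_cons]
    rw [show (List.foldr (fun i l => l.eraseIdx i) (a :: s) (c.map (· + 1))) =
        remIdx (c.map (· + 1)) (a :: s) from rfl, ih]
    rfl

-- A's pop-loop: the same, over Int indices via pop?
def popFoldr (c : List Int) (s : List Char) : List Char := c.foldr (fun idx l => popStep l idx) s

lemma pop?_oob (xs : List Char) (n : Nat) (h : ¬ n < xs.length) :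
    PySem.List.pop? xs ((n : Nat) : Int) = none := by
  unfold PySem.List.pop? PySem.List.pyIdx?
  rw [if_pos (by positivity), if_neg (by exact_mod_cast h)]
  rfl

lemma popStep_succ (x : Nat) (a : Char) (l : List Char) :
    popStep (a :: l) (((x + 1 : Nat) : Int)) = a :: popStep l ((x : Nat) : Int) := by
  by_cases h : x < l.length
  · have h1 := PySem.List.pop?_natCast (a :: l) (x + 1) (by simpa using h)
    have h2 := PySem.List.pop?_natCast l x h
    unfold popStep
    rw [h1, h2]
    simp [List.eraseIdx_cons_succ]
  · have h1 := pop?_oob (a :: l) (x + 1) (by simpa using h)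
    have h2 := pop?_oob l x h
    unfold popStep
    rw [h1, h2]

lemma popFoldr_shift : ∀ (c : List Nat) (a : Char) (s : List Char),
    popFoldr ((c.map (· + 1)).map (fun n : Nat => (n : Int))) (a :: s)
      = a :: popFoldr (c.map (fun n : Nat => (n : Int))) s := by
  intro c
  induction c with
  | nil => intro a s; rfl
  | cons x c ih =>
    intro a s
    have ih' := ih a s
    simp only [popFoldr, List.map_cons, List.foldr_cons] at ih' ⊢
    rw [ih', popStep_succ]

-- combined A-side removal facts: pop?-loop = remIdx, and remIdx is a subsequence
lemma remA : ∀ (s : List Char) (c : List Nat), c.Sublist (List.range s.length) →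
    popFoldr (c.map (fun n : Nat => (n : Int))) s = remIdx c s ∧
    (remIdx c s).Sublist s ∧ (remIdx c s).length = s.length - c.length := by
  intro s
  induction s with
  | nil =>
    intro c hc
    have : c = [] := List.sublist_nil.mp (by simpa using hc)
    subst this; exact ⟨rfl, by simp [remIdx], by simp [remIdx]⟩
  | cons a s ih =>
    intro c hc
    rw [List.length_cons, List.range_succ_eq_map] at hc
    rcases List.sublist_cons_iff.mp hc with htail | ⟨c₂, rfl, hc₂⟩
    · -- c avoids position 0: c = map (+1) c'
      rcases List.sublist_map_iff.mp htail with ⟨c', hc', rfl⟩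
      have hc'r : c'.Sublist (List.range s.length) := hc'
      rcases ih c' hc'r with ⟨hpop, hsub, hlen⟩
      have hmap : c'.map Nat.succ = c'.map (· + 1) := by
        simp
      rw [hmap]
      refine ⟨?_, ?_, ?_⟩
      · rw [popFoldr_shift, remIdx_shift, hpop]
      · rw [remIdx_shift]; exact hsub.cons₂ a
      · rw [remIdx_shift]
        have := hc'.length_le
        simp at this ⊢
        omega
    · -- c = 0 :: c₂ removes the head
      rcases List.sublist_map_iff.mp hc₂ with ⟨c', hc', rfl⟩
      have hc'r : c'.Sublist (List.range s.length) := hc'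
      rcases ih c' hc'r with ⟨hpop, hsub, hlen⟩
      have hmap : c'.map Nat.succ = c'.map (· + 1) := by
        simp
      rw [hmap]
      have hshift := remIdx_shift c' a s
      refine ⟨?_, ?_, ?_⟩
      · show popStep (popFoldr ((c'.map (· + 1)).map (fun n : Nat => (n : Int))) (a :: s)) 0
            = (remIdx (c'.map (· + 1)) (a :: s)).eraseIdx 0
        rw [popFoldr_shift, hpop, hshift, ← hpop]
        simp [popStep, PySem.List.pop?_zero_cons]
      · show ((remIdx (c'.map (· + 1)) (a :: s)).eraseIdx 0).Sublist (a :: s)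
        rw [hshift]
        simp only [List.eraseIdx_cons_zero]
        exact (hsub.trans (List.sublist_cons_self a s))
      · show ((remIdx (c'.map (· + 1)) (a :: s)).eraseIdx 0).length = (a :: s).length - (0 :: c'.map (· + 1)).length
        rw [hshift]
        have := hc'.length_le
        simp at this ⊢
        omega

-- completeness: every subsequence arises as remIdx of a combination of positions
lemma remIdx_complete : ∀ {s t : List Char}, t.Sublist s →
    ∃ c, c.Sublist (List.range s.length) ∧ c.length = s.length - t.length ∧ remIdx c s = t := by
  intro s t h
  induction h with
  | slnil => exact ⟨[], by simp, by simp, rfl⟩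
  | @cons t s a h ih =>
    rcases ih with ⟨c', hc', hlen, hrem⟩
    refine ⟨0 :: c'.map (· + 1), ?_, ?_, ?_⟩
    · rw [List.length_cons, List.range_succ_eq_map]
      have : (c'.map (· + 1)).Sublist ((List.range s.length).map Nat.succ) := by
        have := hc'.map (· + 1)
        simpa [Nat.succ_eq_add_one] using this
      exact this.cons₂ 0
    · have := h.length_le
      simp at this ⊢
      omega
    · show (remIdx (c'.map (· + 1)) (a :: s)).eraseIdx 0 = t
      rw [remIdx_shift, List.eraseIdx_cons_zero, hrem]
  | @cons₂ t s a h ih =>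
    rcases ih with ⟨c', hc', hlen, hrem⟩
    refine ⟨c'.map (· + 1), ?_, ?_, ?_⟩
    · rw [List.length_cons, List.range_succ_eq_map]
      have : (c'.map (· + 1)).Sublist ((List.range s.length).map Nat.succ) := by
        have := hc'.map (· + 1)
        simpa [Nat.succ_eq_add_one] using this
      exact (this.cons 0)
    · have := h.length_le
      simp at this ⊢
      omega
    · rw [remIdx_shift, hrem]

-- String ≤ is lexicographic ≤ on the character lists
lemma ofList_le_ofList (l r : List Char) : String.ofList l ≤ String.ofList r ↔ l ≤ r := by
  rw [← not_lt, ← not_lt, String.lt_iff_toList_lt]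
  simp

-- ===== VERDICT (by name: the statement is the Claim_ definition above) =====
theorem solution_spec : Claim_equal_solution := by
  intro number k _ hpre
  rcases hpre with ⟨hk0, hkl⟩
  simp only [Spec_solution, solution, solution_alt]
  rw [PySem.Str.len_eq] at hkl ⊢
  set s := number.toList with hs
  set n := s.length with hn
  have hkn : k.toNat ≤ n := by omega
  set kn := k.toNat with hkn'
  set m := n - kn with hm
  have hkeep : ((n : Int) - k).toNat = m := by omega
  rw [hkeep, bLoop_eq_gMax]
  simp only [List.nil_append]
  -- rewrite A's fold as a map over the combinations
  rw [PySem.List.pyRange_zero_natCast n]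
  rw [PySem.List.combinations_map]
  set f : List Nat → String := fun c => String.ofList (remIdx c s) with hf
  have hfold :
      (List.foldl (fun acc combo =>
          acc ++ [String.ofList (combo.foldr (fun idx l => popStep l idx) s)]) []
        ((PySem.List.combinations (List.range n) kn).map (List.map (fun k : Nat => (k : Int)))))
      = ((PySem.List.combinations (List.range n) kn).map (List.map (fun k : Nat => (k : Int)))).map
          (fun combo => String.ofList (combo.foldr (fun idx l => popStep l idx) s)) := by
    simpa using PySem.List.foldl_append_singleton_eq_map
      (fun combo => String.ofList (combo.foldr (fun idx l => popStep l idx) s))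
      ((PySem.List.combinations (List.range n) kn).map (List.map (fun k : Nat => (k : Int)))) []
  rw [hfold, List.map_map]
  set mlist := (PySem.List.combinations (List.range n) kn).map
      ((fun combo => String.ofList (combo.foldr (fun idx l => popStep l idx) s)) ∘
        List.map (fun k : Nat => (k : Int))) with hml
  -- every member of mlist is String.ofList of a subsequence of length m, hence ≤ the greedy answer
  have hmem_le : ∀ x ∈ mlist, x ≤ String.ofList (gMax s m) := by
    intro x hx
    rcases List.mem_map.mp hx with ⟨c, hcmem, rfl⟩
    rcases (PySem.List.mem_combinations_iff _ _ _).mp hcmem with ⟨hcsub, hclen⟩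
    rcases remA s c hcsub with ⟨hpop, hsub, hlen⟩
    simp only [Function.comp]
    rw [show (List.foldr (fun idx l => popStep l idx) s (c.map (fun k : Nat => (k : Int))))
        = popFoldr (c.map (fun n : Nat => (n : Int))) s from rfl, hpop]
    rw [ofList_le_ofList]
    exact gMax_max m s (remIdx c s) (by omega) hsub (by omega)
  -- the greedy answer itself is a member of mlist
  have hg_mem : String.ofList (gMax s m) ∈ mlist := by
    rcases gMax_sublist m s (by omega) with ⟨hgsub, hglen⟩
    rcases remIdx_complete hgsub with ⟨c, hcsub, hclen, hrem⟩
    have hc_mem : c ∈ PySem.List.combinations (List.range n) kn := by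
      rw [PySem.List.mem_combinations_iff]
      exact ⟨hcsub, by rw [hclen, hglen]; omega⟩
    rcases remA s c hcsub with ⟨hpop, _, _⟩
    apply List.mem_map.mpr
    refine ⟨c, hc_mem, ?_⟩
    simp only [Function.comp]
    rw [show (List.foldr (fun idx l => popStep l idx) s (c.map (fun k : Nat => (k : Int))))
        = popFoldr (c.map (fun n : Nat => (n : Int))) s from rfl, hpop, hrem]
  -- hence the Python max is exactly the greedy answer
  have hne : mlist ≠ [] := by
    intro hnil; rw [hnil] at hg_mem; simp at hg_mem
  cases hmax : PySem.List.max? mlist (fun x => x) with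
  | none => exact absurd ((PySem.List.max?_eq_none_iff _ _).mp hmax) hne
  | some v =>
    have hv_mem : v ∈ mlist := PySem.List.max?_mem hmax
    have hv_le : v ≤ String.ofList (gMax s m) := hmem_le v hv_mem
    have hg_le : String.ofList (gMax s m) ≤ v := PySem.List.max?_isMax hmax _ hg_mem
    simp [le_antisymm hv_le hg_le]
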